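-- pv_equiv track=rewrite | github.com/bokar83/agentHQ | scripts/check_hook_registration.py | _diff_has_annotations
-- ===== SOURCE A (Python) =====
-- ANNOTATION_KEYS = {
--     "HOOK_MODEL",
--     "HOOK_MAX_CONTEXT",
--     "HOOK_COST_PER_FIRE",
--     "HOOK_FIRING_RATE",
-- }
--
-- def _diff_has_annotations(diff: str) -> bool:
--     """Check that all four annotation keys appear somewhere in the staged diff."""
--     found = set()
--     for line in diff.splitlines():
--         if not line.startswith("+"):
--             continue
--         for key in ANNOTATION_KEYS:
--             if f"# {key}:" in line or f"// {key}:" in line: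
--                 found.add(key)
--     return ANNOTATION_KEYS.issubset(found)
-- ===== SOURCE B (Python) =====
-- ANNOTATION_KEYS = {
--     "HOOK_MODEL",
--     "HOOK_MAX_CONTEXT",
--     "HOOK_COST_PER_FIRE",
--     "HOOK_FIRING_RATE",
-- }
--
-- def _diff_has_annotations(diff: str) -> bool:
--     """Per-key existence check: every key must appear on some added line."""
--     lines = diff.splitlines()
--     return all(
--         any(
--             line.startswith("+")
--             and (f"# {key}:" in line or f"// {key}:" in line)
--             for line in lines
--         )
--         for key in ANNOTATION_KEYS
--     )
-- ===== Notes on version B (the rewrite author's own statement) =====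
-- stated objective: idiomatic
-- what changed: Inverted the loop nesting to a per-key existence check (all/any with short-circuit), dropping the accumulated set of matched keys entirely.
import Mathlib
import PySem

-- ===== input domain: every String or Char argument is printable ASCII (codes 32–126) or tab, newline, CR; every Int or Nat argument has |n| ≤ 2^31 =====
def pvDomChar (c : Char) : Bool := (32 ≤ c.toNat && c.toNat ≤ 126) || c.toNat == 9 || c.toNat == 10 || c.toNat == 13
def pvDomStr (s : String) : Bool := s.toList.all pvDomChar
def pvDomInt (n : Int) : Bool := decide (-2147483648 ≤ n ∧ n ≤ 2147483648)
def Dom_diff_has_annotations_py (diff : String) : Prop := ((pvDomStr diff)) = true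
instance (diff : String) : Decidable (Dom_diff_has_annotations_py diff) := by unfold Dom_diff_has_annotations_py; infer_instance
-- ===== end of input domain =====

-- B changes: per-key existence check (all/any) instead of accumulating a 'found' set over one pass; objective: idiomatic.

-- the ANNOTATION_KEYS module constant (result is order-independent, so a fixed listing is exact)
def annotationKeys : List String :=
  ["HOOK_MODEL", "HOOK_MAX_CONTEXT", "HOOK_COST_PER_FIRE", "HOOK_FIRING_RATE"]

-- 'f"# {key}:" in line or f"// {key}:" in line'
def keyOnLine (key line : String) : Bool :=
  PySem.Str.isIn ("# " ++ key ++ ":") line || PySem.Str.isIn ("// " ++ key ++ ":") line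

-- ===== PORT A =====
def diff_has_annotations_py (diff : String) : Bool :=
  let found : PySem.Set String :=
    (PySem.Str.splitlines diff).foldl (fun found line =>
      if !(PySem.Str.startswith line "+") then found
      else annotationKeys.foldl (fun found key =>
        if keyOnLine key line then PySem.Set.add found key else found) found)
      PySem.Set.empty
  PySem.Set.issubset (PySem.Set.ofList annotationKeys) found

-- ===== PORT B =====
def diff_has_annotations_py_alt (diff : String) : Bool :=
  let lines := PySem.Str.splitlines diff
  annotationKeys.all (fun key =>
    lines.any (fun line => PySem.Str.startswith line "+" && keyOnLine key line))

-- ===== PRECONDITION & SPEC =====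
def Spec_diff_has_annotations_py (diff : String) (out : Bool) : Prop := out = diff_has_annotations_py_alt diff
instance (diff : String) (out : Bool) : Decidable (Spec_diff_has_annotations_py diff out) := by unfold Spec_diff_has_annotations_py; infer_instance

-- ===== CLAIM (what is proved, stated in full; the proofs are below) =====
def Claim_equal_diff_has_annotations_py : Prop := ∀ (diff : String), Dom_diff_has_annotations_py diff → Spec_diff_has_annotations_py diff (diff_has_annotations_py diff)

-- ===== LEMMAS AND PROOFS =====

-- the inner key loop: membership in the resulting set
theorem mem_inner_foldl (keys : List String) (s : PySem.Set String) (line k : String) :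
    k ∈ keys.foldl (fun found key =>
        if keyOnLine key line then PySem.Set.add found key else found) s
      ↔ k ∈ s ∨ (k ∈ keys ∧ keyOnLine k line = true) := by
  induction keys generalizing s with
  | nil => simp
  | cons key rest ih =>
    simp only [List.foldl_cons, ih]
    by_cases h : keyOnLine key line = true
    · rw [if_pos h, PySem.Set.mem_add]
      constructor
      · rintro ((hs | rfl) | ⟨hm, hp⟩)
        · exact Or.inl hs
        · exact Or.inr ⟨List.mem_cons_self, h⟩
        · exact Or.inr ⟨List.mem_cons_of_mem _ hm, hp⟩
      · rintro (hs | ⟨hm, hp⟩)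
        · exact Or.inl (Or.inl hs)
        · rcases List.mem_cons.mp hm with rfl | hm
          · exact Or.inl (Or.inr rfl)
          · exact Or.inr ⟨hm, hp⟩
    · rw [if_neg h]
      constructor
      · rintro (hs | ⟨hm, hp⟩)
        · exact Or.inl hs
        · exact Or.inr ⟨List.mem_cons_of_mem _ hm, hp⟩
      · rintro (hs | ⟨hm, hp⟩)
        · exact Or.inl hs
        · rcases List.mem_cons.mp hm with rfl | hm
          · exact absurd hp h
          · exact Or.inr ⟨hm, hp⟩

-- the outer line loop: membership in the final 'found' set
theorem mem_outer_foldl (lines : List String) (s : PySem.Set String) (k : String) :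
    k ∈ lines.foldl (fun found line =>
        if !(PySem.Str.startswith line "+") then found
        else annotationKeys.foldl (fun found key =>
          if keyOnLine key line then PySem.Set.add found key else found) found) s
      ↔ k ∈ s ∨ ∃ line ∈ lines,
          PySem.Str.startswith line "+" = true ∧ k ∈ annotationKeys ∧ keyOnLine k line = true := by
  induction lines generalizing s with
  | nil => simp
  | cons line rest ih =>
    simp only [List.foldl_cons, ih]
    by_cases h : PySem.Str.startswith line "+" = true
    · rw [if_neg (by simpa [PySem.Str.startswith] using h), mem_inner_foldl]
      constructor
      · rintro ((hs | ⟨hm, hp⟩) | ⟨l, hl, h1, h2, h3⟩)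
        · exact Or.inl hs
        · exact Or.inr ⟨line, List.mem_cons_self, h, hm, hp⟩
        · exact Or.inr ⟨l, List.mem_cons_of_mem _ hl, h1, h2, h3⟩
      · rintro (hs | ⟨l, hl, h1, h2, h3⟩)
        · exact Or.inl (Or.inl hs)
        · rcases List.mem_cons.mp hl with rfl | hl
          · exact Or.inl (Or.inr ⟨h2, h3⟩)
          · exact Or.inr ⟨l, hl, h1, h2, h3⟩
    · rw [if_pos (by simpa [PySem.Str.startswith, Bool.not_eq_true] using h)]
      constructor
      · rintro (hs | ⟨l, hl, h1, h2, h3⟩)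
        · exact Or.inl hs
        · exact Or.inr ⟨l, List.mem_cons_of_mem _ hl, h1, h2, h3⟩
      · rintro (hs | ⟨l, hl, h1, h2, h3⟩)
        · exact Or.inl hs
        · rcases List.mem_cons.mp hl with rfl | hl
          · exact absurd h1 h
          · exact Or.inr ⟨l, hl, h1, h2, h3⟩

-- ===== VERDICT (by name: the statement is the Claim_ definition above) =====
theorem diff_has_annotations_py_spec : Claim_equal_diff_has_annotations_py := by
  intro diff _
  unfold Spec_diff_has_annotations_py diff_has_annotations_py diff_has_annotations_py_alt
  rw [Bool.eq_iff_iff]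
  simp only [PySem.Set.issubset_iff, List.all_eq_true, List.any_eq_true,
    PySem.Set.mem_ofList, mem_outer_foldl, PySem.Set.empty, List.not_mem_nil, false_or,
    Bool.and_eq_true]
  constructor
  · intro h key hk
    obtain ⟨line, hl, h1, _, h3⟩ := h key hk
    exact ⟨line, hl, h1, h3⟩
  · intro h key hk
    obtain ⟨line, hl, h1, h3⟩ := h key hk
    exact ⟨line, hl, h1, hk, h3⟩
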